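-- pv_equiv track=rewrite | github.com/ChrisP3D/ChrisPTD_Houdini | scripts/python/cph/cph_parmUtils.py | injectString
-- ===== SOURCE A (Python) =====
-- def injectString(string, key_char, injection):
--     payload = ''
--     idx = string.index(key_char)
--     for i,char in enumerate(string):
--             if i == idx:
--                 char += injection
--             payload += char
--
--     return payload
-- ===== SOURCE B (Python) =====
-- def injectString(string, key_char, injection):
--     idx = string.index(key_char)
--     return string[:idx + 1] + injection + string[idx + 1:]
-- ===== Notes on version B (the rewrite author's own statement) =====
-- stated objective: faster
-- what changed: Replace the character-by-character enumerate loop with its per-character branch and repeated string accumulation by a single index lookup and one slice-splice string[:idx+1] + injection + string[idx+1:] (no Python-level loop).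
-- intended difference: On the empty string with empty key_char and nonempty injection, A's loop never runs and returns '' (silently dropping the injection even though index('')==0 matched); B returns the injection itself, the intended result of inserting after the matched position. — e.g. on injectString("", "", "X"): A returns "", B returns "X"
import Mathlib
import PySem

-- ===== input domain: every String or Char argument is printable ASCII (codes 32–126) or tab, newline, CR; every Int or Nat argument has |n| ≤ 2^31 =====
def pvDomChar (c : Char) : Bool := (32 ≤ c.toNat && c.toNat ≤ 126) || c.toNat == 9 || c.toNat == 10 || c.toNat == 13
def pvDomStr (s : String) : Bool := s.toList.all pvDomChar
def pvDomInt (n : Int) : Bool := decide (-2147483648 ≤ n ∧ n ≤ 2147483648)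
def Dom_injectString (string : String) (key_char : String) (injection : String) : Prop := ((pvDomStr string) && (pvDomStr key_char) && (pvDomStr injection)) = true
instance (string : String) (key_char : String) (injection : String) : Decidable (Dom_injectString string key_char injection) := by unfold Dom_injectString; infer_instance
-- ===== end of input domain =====

-- B replaces A's per-character enumerate loop (with its quadratic accumulation) by one
-- index lookup and a single slice-splice; objective: simpler.

-- ===== PORT A =====
-- literal transliteration of A: idx = string.index(key_char) (Pre_ excludes the ValueError case),
-- then a fold over enumerate(string) accumulating payload, appending injection at position idx.
def injectString (string : String) (key_char : String) (injection : String) : String :=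
  String.ofList
    ((PySem.List.enumerate string.toList 0).foldl
      (fun acc p =>
        acc ++ (if p.1 = PySem.Str.find string key_char then p.2 :: injection.toList else [p.2]))
      [])

-- ===== PORT B =====
-- transliteration of Source B: idx = string.index(key_char); string[:idx+1] + injection + string[idx+1:]
def injectString_alt (string : String) (key_char : String) (injection : String) : String :=
  String.ofList
    (PySem.List.slice string.toList none (some (PySem.Str.find string key_char + 1)) ++
     injection.toList ++
     PySem.List.slice string.toList (some (PySem.Str.find string key_char + 1)) none)

-- ===== PRECONDITION & SPEC =====
-- Pre_ excludes exactly the inputs where string.index(key_char) raises ValueError (key_char not a substring).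
def Pre_injectString (string : String) (key_char : String) (injection : String) : Prop :=
  PySem.Str.find string key_char ≠ -1

instance (string : String) (key_char : String) (injection : String) : Decidable (Pre_injectString string key_char injection) := by unfold Pre_injectString; infer_instance

def pvWitness_injectString : String × String × String := ("abc", "b", "XY")

-- On the empty string with empty key_char and nonempty injection, A's loop never runs and
-- returns '' (silently dropping the injection although index('') == 0 matched); B returns the
-- injection itself, the intended result of inserting after the matched position.
def D_injectString (string : String) (key_char : String) (injection : String) : Prop :=
  string = "" ∧ key_char = "" ∧ injection ≠ ""

instance (string : String) (key_char : String) (injection : String) : Decidable (D_injectString string key_char injection) := by unfold D_injectString; infer_instance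

def Spec_injectString (string : String) (key_char : String) (injection : String) (out : String) : Prop := ¬ D_injectString string key_char injection → out = injectString_alt string key_char injection
instance (string : String) (key_char : String) (injection : String) (out : String) : Decidable (Spec_injectString string key_char injection out) := by unfold Spec_injectString; infer_instance

def pvDiffWitness_injectString : String × String × String := ("", "", "X")
def pvDiffWitnessOut_injectString : String × String := ("", "X")

-- ===== CLAIM (what is proved, stated in full; the proofs are below) =====
def Claim_unchanged_injectString : Prop := ∀ (string : String) (key_char : String) (injection : String), Dom_injectString string key_char injection → Pre_injectString string key_char injection → Spec_injectString string key_char injection (injectString string key_char injection)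
def Claim_changed_injectString : Prop := Dom_injectString (pvDiffWitness_injectString.1) (pvDiffWitness_injectString.2.1) (pvDiffWitness_injectString.2.2) ∧ Pre_injectString (pvDiffWitness_injectString.1) (pvDiffWitness_injectString.2.1) (pvDiffWitness_injectString.2.2) ∧ D_injectString (pvDiffWitness_injectString.1) (pvDiffWitness_injectString.2.1) (pvDiffWitness_injectString.2.2) ∧ injectString (pvDiffWitness_injectString.1) (pvDiffWitness_injectString.2.1) (pvDiffWitness_injectString.2.2) = pvDiffWitnessOut_injectString.1 ∧ injectString_alt (pvDiffWitness_injectString.1) (pvDiffWitness_injectString.2.1) (pvDiffWitness_injectString.2.2) = pvDiffWitnessOut_injectString.2 ∧ pvDiffWitnessOut_injectString.1 ≠ pvDiffWitnessOut_injectString.2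
def Claim_exact_injectString : Prop := ∀ (string : String) (key_char : String) (injection : String), Dom_injectString string key_char injection → Pre_injectString string key_char injection → D_injectString string key_char injection → injectString string key_char injection ≠ injectString_alt string key_char injection

-- ===== LEMMAS AND PROOFS =====

-- shift the start index of an enumeration
theorem enumerate_succ_eq_map {α : Type} (l : List α) (s : Int) :
    PySem.List.enumerate l (s + 1) = (PySem.List.enumerate l s).map (fun p => (p.1 + 1, p.2)) := by
  induction l generalizing s with
  | nil => simp [PySem.List.enumerate_nil]
  | cons x xs ih => simp [PySem.List.enumerate_cons, ih]

-- when the matched index lies strictly below the start, the fold body copies every character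
theorem flatMap_enumerate_no_match (l : List Char) (inj : List Char) (s idx : Int) (h : idx < s) :
    ((PySem.List.enumerate l s).flatMap
      (fun p => if p.1 = idx then p.2 :: inj else [p.2])) = l := by
  induction l generalizing s with
  | nil => simp [PySem.List.enumerate_nil]
  | cons x xs ih =>
    rw [PySem.List.enumerate_cons, List.flatMap_cons]
    have hne : (s : Int) ≠ idx := by omega
    simp only [hne]
    rw [ih (s + 1) (by omega)]
    simp

-- the accumulation loop of A, with matched index n < |l|, is a splice at n+1
theorem flatMap_enumerate_splice (l : List Char) (inj : List Char) (n : Nat) (h : n < l.length) :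
    ((PySem.List.enumerate l 0).flatMap
      (fun p => if p.1 = (n : Int) then p.2 :: inj else [p.2])) =
    l.take (n + 1) ++ inj ++ l.drop (n + 1) := by
  induction l generalizing n with
  | nil => simp at h
  | cons x xs ih =>
    rw [PySem.List.enumerate_cons, List.flatMap_cons]
    cases n with
    | zero =>
      simp only [Nat.cast_zero]
      rw [flatMap_enumerate_no_match xs inj (0 + 1) 0 (by omega)]
      simp
    | succ m =>
      have hne : (0 : Int) ≠ ((m + 1 : Nat) : Int) := by push_cast; omega
      rw [if_neg hne]
      rw [enumerate_succ_eq_map xs 0, List.flatMap_map]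
      have hcond : ∀ p : Int × Char,
          (if p.1 + 1 = ((m + 1 : Nat) : Int) then p.2 :: inj else [p.2]) =
          (if p.1 = (m : Int) then p.2 :: inj else [p.2]) := by
        intro p
        by_cases hp : p.1 = (m : Int)
        · rw [if_pos hp, if_pos (by push_cast; omega)]
        · rw [if_neg hp, if_neg (by push_cast; omega)]
      simp only [hcond]
      rw [ih m (by simpa using h)]
      simp

theorem injectString_eq_alt (string key_char injection : String)
    (hpre : PySem.Str.find string key_char ≠ -1)
    (hlt : (PySem.Str.find string key_char).toNat < string.toList.length) :
    injectString string key_char injection = injectString_alt string key_char injection := by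
  unfold injectString injectString_alt
  have h0 : (0 : Int) ≤ PySem.Str.find string key_char := by
    simp only [PySem.Str.find] at hpre ⊢
    have := PySem.Chars.neg_one_le_find string.toList key_char.toList
    omega
  set f := PySem.Str.find string key_char with hf
  have hfn : f = ((f.toNat : Nat) : Int) := by omega
  rw [PySem.List.foldl_append_eq_flatMap, List.nil_append]
  rw [hfn, flatMap_enumerate_splice string.toList injection.toList f.toNat hlt]
  rw [PySem.List.slice_to string.toList (b := (f.toNat : Int) + 1) (by positivity),
      PySem.List.slice_from string.toList (a := (f.toNat : Int) + 1) (by positivity)]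
  have h1 : ((f.toNat : Int) + 1).toNat = f.toNat + 1 := by omega
  rw [h1]

-- under Pre_, the found index is in range unless string and key_char are both empty
theorem find_toNat_lt (string key_char : String)
    (hpre : PySem.Str.find string key_char ≠ -1) (hs : string.toList ≠ []) :
    (PySem.Str.find string key_char).toNat < string.toList.length := by
  simp only [PySem.Str.find] at hpre ⊢
  have h0 : (0 : Int) ≤ PySem.Chars.find string.toList key_char.toList := by
    have := PySem.Chars.neg_one_le_find string.toList key_char.toList
    omega
  rcases PySem.Chars.find_spec h0 with ⟨hpref, -⟩
  by_cases hk : key_char.toList = []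
  · rw [hk] at *
    rw [PySem.Chars.find_nil]
    simpa using List.length_pos_iff.mpr hs
  · by_contra hge
    rw [not_lt] at hge
    have hdrop : string.toList.drop (PySem.Chars.find string.toList key_char.toList).toNat = [] :=
      List.drop_eq_nil_of_le hge
    rw [hdrop] at hpref
    exact hk (List.prefix_nil.mp hpref)

-- ===== VERDICT (by name: the statement is the Claim_ definition above) =====
theorem injectString_spec : Claim_unchanged_injectString := by
  intro string key_char injection _ hpre hnd
  by_cases hs : string.toList = []
  · -- string = ""; Pre_ forces key_char = "", ¬D_ forces injection = ""
    have hstr : string = "" := by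
      have := congrArg String.ofList hs
      simpa using this
    subst hstr
    have hk : key_char = "" := by
      by_contra hk
      apply hpre
      rw [PySem.Str.find_eq_neg_one_iff]
      intro hinf
      have h2 : key_char.toList = [] := List.infix_nil.mp (by simpa using hinf)
      exact hk (by simpa using congrArg String.ofList h2)
    subst hk
    have hinj : injection = "" := by
      by_contra hinj
      exact hnd ⟨rfl, rfl, hinj⟩
    subst hinj
    decide
  · exact injectString_eq_alt string key_char injection hpre
      (find_toNat_lt string key_char hpre hs)

theorem injectString_changed : Claim_changed_injectString := by
  unfold Claim_changed_injectString; decide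

theorem injectString_tight : Claim_exact_injectString := by
  intro string key_char injection _ _ hd
  rcases hd with ⟨hs, hk, hinj⟩
  subst hs; subst hk
  intro h
  apply hinj
  have hf : PySem.Str.find "" "" = 0 := by decide
  have hA : injectString "" "" injection = "" := rfl
  have hB : injectString_alt "" "" injection = injection := by
    unfold injectString_alt
    rw [hf]
    rw [PySem.List.slice_to (("" : String).toList) (b := (0 : Int) + 1) (by omega),
        PySem.List.slice_from (("" : String).toList) (a := (0 : Int) + 1) (by omega)]
    simp
  rw [hA, hB] at h
  exact h.symm
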